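-- pv_equiv track=rewrite | github.com/joelmac/zodiac_halloween | the_most_dangerous_game.py | _consonants_subsequence_length
-- ===== SOURCE A (Python) =====
-- consonants = "bcdfghjklmnpqrstvwxz".upper()
--
-- def _consonants_subsequence_length(state_text):
--     longest_sub_value = 0
--     longest_sub_index = 0
--     index = 0
--     while index < len(state_text):
--         if state_text[index] in consonants:
--             j = 1
--             while index + j < len(state_text) and state_text[index+j] in consonants:
--                 j = j+1
--             if j > longest_sub_value:
--                 longest_sub_value = j
--                 longest_sub_index = index
--             index = index + (j+1)
--         else:
--             index = index + 1
--     return longest_sub_value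
-- ===== SOURCE B (Python) =====
-- consonants = "bcdfghjklmnpqrstvwxz".upper()
--
-- def _consonants_subsequence_length(state_text):
--     # Boundary-gap method: record the positions of all NON-consonant characters,
--     # bracketed by sentinels -1 and n; each maximal consonant run lies strictly
--     # between two consecutive boundaries, so the answer is the largest gap - 1.
--     n = len(state_text)
--     boundaries = [-1] + [i for i, c in enumerate(state_text) if c not in consonants] + [n]
--     return max(b - a - 1 for a, b in zip(boundaries, boundaries[1:]))
-- ===== Notes on version B (the rewrite author's own statement) =====
-- stated objective: alternative
-- what changed: Instead of scanning consonant runs with nested index/skip-ahead loops, B records the positions of the non-consonant characters (bracketed by sentinels -1 and n) and returns the largest gap between consecutive boundary positions minus one.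
import Mathlib
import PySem

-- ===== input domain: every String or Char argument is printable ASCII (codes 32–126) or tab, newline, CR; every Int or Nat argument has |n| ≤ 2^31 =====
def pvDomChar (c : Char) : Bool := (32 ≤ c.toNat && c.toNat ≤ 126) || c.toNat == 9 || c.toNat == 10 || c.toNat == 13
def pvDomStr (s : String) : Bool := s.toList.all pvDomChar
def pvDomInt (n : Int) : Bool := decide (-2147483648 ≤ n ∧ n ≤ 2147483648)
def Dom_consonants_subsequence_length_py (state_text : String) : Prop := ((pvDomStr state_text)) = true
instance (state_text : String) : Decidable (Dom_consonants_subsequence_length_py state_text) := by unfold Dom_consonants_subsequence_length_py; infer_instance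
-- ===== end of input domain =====

-- B replaces A's nested index/skip-ahead while loops by a boundary-gap computation: it
-- lists the positions of the non-consonant characters (with sentinels -1 and n) and
-- returns the largest gap between consecutive boundaries minus one; alternative, same cost.


-- consonants = "bcdfghjklmnpqrstvwxz".upper()
def pvConsonants : List Char := "BCDFGHJKLMNPQRSTVWXZ".toList

-- ===== PORT A =====
-- inner while loop: j = 1; while index + j < len and state_text[index+j] in consonants: j += 1
-- (Python's indices here start at 0 and only grow, so they are ported as Nat; s[i] with the
-- while-guard i < len in force is ported as getD, which is exact in range.)
def pvInnerA (s : List Char) (index j : Nat) : Nat :=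
  if index + j < s.length ∧ s.getD (index + j) ' ' ∈ pvConsonants then
    pvInnerA s index (j + 1)
  else j
termination_by s.length - (index + j)
decreasing_by omega

-- outer while loop, carrying (longest_sub_value, longest_sub_index, index)
def pvLoopA (s : List Char) (index best bestIdx : Nat) : Nat :=
  if index < s.length then
    if s.getD index ' ' ∈ pvConsonants then
      let j := pvInnerA s index 1
      if j > best then pvLoopA s (index + (j + 1)) j index
      else pvLoopA s (index + (j + 1)) best bestIdx
    else pvLoopA s (index + 1) best bestIdx
  else best
termination_by s.length - index
decreasing_by all_goals omega

def consonants_subsequence_length_py (state_text : String) : Int :=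
  (pvLoopA state_text.toList 0 0 0 : Int)

-- ===== PORT B =====
-- [i for i, c in enumerate(state_text) if c not in consonants], with running counter k
def pvIdxFrom (s : List Char) (k : Int) : List Int :=
  match s with
  | [] => []
  | c :: r => if c ∈ pvConsonants then pvIdxFrom r (k + 1) else k :: pvIdxFrom r (k + 1)

-- the generator (b - a - 1 for a, b in zip(boundaries, boundaries[1:]))
def pvGaps : List Int → List Int
  | a :: b :: r => (b - a - 1) :: pvGaps (b :: r)
  | _ => []

-- max(...) on a nonempty list; the [] branch is unreachable in the port (Python's max would
-- raise there, but the boundary list always has at least the two sentinels, so gaps ≠ [])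
def pvMaxOf : List Int → Int
  | [] => 0
  | g :: gs => gs.foldl max g

def consonants_subsequence_length_py_alt (state_text : String) : Int :=
  pvMaxOf (pvGaps ((-1) :: pvIdxFrom state_text.toList 0 ++ [(state_text.toList.length : Int)]))

-- ===== PRECONDITION & SPEC =====
def Spec_consonants_subsequence_length_py (state_text : String) (out : Int) : Prop := out = consonants_subsequence_length_py_alt state_text
instance (state_text : String) (out : Int) : Decidable (Spec_consonants_subsequence_length_py state_text out) := by unfold Spec_consonants_subsequence_length_py; infer_instance

-- ===== CLAIM (what is proved, stated in full; the proofs are below) =====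
def Claim_equal_consonants_subsequence_length_py : Prop := ∀ (state_text : String), Dom_consonants_subsequence_length_py state_text → Spec_consonants_subsequence_length_py state_text (consonants_subsequence_length_py state_text)

-- ===== LEMMAS AND PROOFS =====

-- run-length view used as the middle term of the proof: the lengths of the maximal
-- consonant runs of t, with cur the length of the run currently open
def pvGoRuns (s : List Char) (cur : Nat) : List Nat :=
  match s with
  | [] => if cur > 0 then [cur] else []
  | c :: rest =>
    if c ∈ pvConsonants then pvGoRuns rest (cur + 1)
    else if cur > 0 then cur :: pvGoRuns rest 0 else pvGoRuns rest 0

def pvM (t : List Char) : Nat := (pvGoRuns t 0).foldl Nat.max 0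

theorem pv_foldl_max (a : Nat) (l : List Nat) :
    l.foldl Nat.max a = Nat.max a (l.foldl Nat.max 0) := by
  induction l generalizing a with
  | nil => simp
  | cons x xs ih =>
    simp only [List.foldl]
    rw [ih (Nat.max a x), ih (Nat.max 0 x)]
    simp [Nat.max_assoc]

theorem pv_goRuns_cons_append (u v : List Char) (cur : Nat)
    (hu : ∀ c ∈ u, c ∈ pvConsonants) :
    pvGoRuns (u ++ v) cur = pvGoRuns v (cur + u.length) := by
  induction u generalizing cur with
  | nil => simp
  | cons c rest ih =>
    have hc : c ∈ pvConsonants := hu c (by simp)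
    simp only [List.cons_append, pvGoRuns, if_pos hc]
    rw [ih (cur + 1) (fun d hd => hu d (by simp [hd]))]
    congr 1
    simp [List.length_cons]; omega

theorem pv_inner_spec (s : List Char) (index j : Nat) :
    pvInnerA s index j = j + ((s.drop (index + j)).takeWhile (· ∈ pvConsonants)).length := by
  induction hn : s.length - (index + j) generalizing j with
  | zero =>
    rw [pvInnerA]
    have : ¬ (index + j < s.length ∧ s.getD (index + j) ' ' ∈ pvConsonants) := by
      rintro ⟨h1, _⟩; omega
    rw [if_neg this]
    have : s.drop (index + j) = [] := List.drop_eq_nil_of_le (by omega)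
    simp [this]
  | succ n ih =>
    have hlt : index + j < s.length := by omega
    have hdrop : s.drop (index + j) = s[index + j] :: s.drop (index + j + 1) :=
      List.drop_eq_getElem_cons hlt
    have hgetD : s.getD (index + j) ' ' = s[index + j] := List.getD_eq_getElem s ' ' hlt
    by_cases hc : s[index + j] ∈ pvConsonants
    · rw [pvInnerA, if_pos ⟨hlt, by rw [hgetD]; exact hc⟩]
      rw [ih (j + 1) (by omega)]
      rw [hdrop]
      simp only [List.takeWhile]
      rw [decide_eq_true hc]
      simp only [List.length_cons]
      have : index + (j + 1) = index + j + 1 := by omega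
      rw [this]; omega
    · rw [pvInnerA, if_neg (by rintro ⟨_, h⟩; rw [hgetD] at h; exact hc h)]
      rw [hdrop]
      simp only [List.takeWhile]
      rw [decide_eq_false hc]
      simp

theorem pv_dropWhile_head (p : Char → Bool) (t : List Char) (d : Char) (rest : List Char)
    (h : t.dropWhile p = d :: rest) : p d = false := by
  induction t with
  | nil => simp at h
  | cons c cs ih =>
    rw [List.dropWhile] at h
    cases hc : p c with
    | true => rw [hc] at h; exact ih h
    | false => rw [hc] at h; simp at h; rw [h.1] at hc; exact hc

theorem pv_loop_spec (s : List Char) (index best bestIdx : Nat) :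
    pvLoopA s index best bestIdx = Nat.max best (pvM (s.drop index)) := by
  induction hn : s.length - index using Nat.strong_induction_on generalizing index best bestIdx with
  | _ n ih =>
  by_cases hlt : index < s.length
  · have hdrop : s.drop index = s[index] :: s.drop (index + 1) :=
      List.drop_eq_getElem_cons hlt
    have hgetD : s.getD index ' ' = s[index] := List.getD_eq_getElem s ' ' hlt
    by_cases hc : s[index] ∈ pvConsonants
    · set t := s.drop (index + 1) with ht
      have hj : pvInnerA s index 1 = 1 + (t.takeWhile (fun x => decide (x ∈ pvConsonants))).length := by
        rw [pv_inner_spec]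
      set j := pvInnerA s index 1 with hjdef
      have hjpos : 1 ≤ j := by rw [hj]; omega
      set u := t.takeWhile (fun x => decide (x ∈ pvConsonants)) with hu
      set w := t.dropWhile (fun x => decide (x ∈ pvConsonants)) with hw
      have hsplit : s.drop index = (s[index] :: u) ++ w := by
        rw [hdrop]; simp [hu, hw, List.takeWhile_append_dropWhile]
      have hulen : (s[index] :: u).length = j := by
        simp only [List.length_cons, hj, hu]; omega
      have hucons : ∀ c ∈ s[index] :: u, c ∈ pvConsonants := by
        intro c hcmem
        rcases List.mem_cons.mp hcmem with h | h
        · rw [h]; exact hc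
        · have := List.mem_takeWhile_imp (l := t) (p := fun x => decide (x ∈ pvConsonants)) h
          simpa using this
      have hwdrop : w = s.drop (index + j) := by
        have h1 : s.drop (index + j) = (s.drop index).drop j := List.drop_drop.symm
        rw [h1, hsplit, ← hulen, List.drop_left]
      have hdropj1 : s.drop (index + (j + 1)) = w.tail := by
        have h1 : s.drop (index + (j + 1)) = (s.drop (index + j)).drop 1 := by
          rw [show index + (j + 1) = (index + j) + 1 from by omega, ← List.drop_drop]
        rw [h1, ← hwdrop, List.drop_one]
      have hMeq : pvM (s.drop index) = Nat.max j (pvM (s.drop (index + (j + 1)))) := by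
        unfold pvM
        rw [hsplit, pv_goRuns_cons_append _ _ _ hucons, hulen, Nat.zero_add, hdropj1]
        cases hwc : w with
        | nil =>
          simp [pvGoRuns, if_pos (by omega : j > 0)]
        | cons d rest =>
          have hd : ¬ d ∈ pvConsonants := by
            have := pv_dropWhile_head _ t d rest (hw ▸ hwc)
            simpa using this
          simp only [pvGoRuns, if_neg hd, if_pos (by omega : j > 0), List.tail_cons]
          rw [List.foldl]
          rw [pv_foldl_max]
          simp
      rw [pvLoopA, if_pos hlt, if_pos (hgetD ▸ hc)]
      by_cases hbj : j > best
      · rw [if_pos hbj, ← hjdef,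
            ih (s.length - (index + (j + 1))) (by omega) _ _ _ rfl, hMeq]
        simp only [Nat.max_def]; split_ifs <;> omega
      · rw [if_neg hbj, ← hjdef,
            ih (s.length - (index + (j + 1))) (by omega) _ _ _ rfl, hMeq]
        simp only [Nat.max_def]; split_ifs <;> omega
    · rw [pvLoopA, if_pos hlt, if_neg (hgetD ▸ hc),
          ih (s.length - (index + 1)) (by omega) _ _ _ rfl]
      congr 1
      unfold pvM
      rw [hdrop]
      simp [pvGoRuns, hc]
  · rw [pvLoopA, if_neg hlt]
    rw [List.drop_eq_nil_of_le (by omega)]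
    simp [pvM, pvGoRuns]

-- shift lemma for the enumerate counter
theorem pv_idxFrom_shift (s : List Char) (k : Int) :
    pvIdxFrom s (k + 1) = (pvIdxFrom s k).map (· + 1) := by
  induction s generalizing k with
  | nil => simp [pvIdxFrom]
  | cons c r ih =>
    by_cases hc : c ∈ pvConsonants
    · simp only [pvIdxFrom, if_pos hc]; exact ih (k + 1)
    · simp only [pvIdxFrom, if_neg hc, List.map_cons]; rw [ih (k + 1)]

-- gaps are invariant under translating all boundaries
theorem pv_gaps_shift (l : List Int) : pvGaps (l.map (· + 1)) = pvGaps l := by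
  induction l with
  | nil => simp [pvGaps]
  | cons a t ih =>
    cases t with
    | nil => simp [pvGaps]
    | cons b r =>
      simp only [List.map_cons] at ih ⊢
      simp only [pvGaps]
      rw [ih]
      congr 1
      ring

theorem pv_foldl_imax (l : List Int) : ∀ a b : Int, l.foldl max (max a b) = max a (l.foldl max b) := by
  induction l with
  | nil => intro a b; simp
  | cons x t ih =>
    intro a b
    simp only [List.foldl]
    rw [max_assoc, ih]

theorem pv_maxOf_cons (a g : Int) (gs : List Int) :
    pvMaxOf (a :: g :: gs) = max a (pvMaxOf (g :: gs)) := by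
  simp only [pvMaxOf, List.foldl]
  rw [pv_foldl_imax]

-- the bridge: the boundary-gap value with open-run length cur equals the run-length max
theorem pv_bridge (s : List Char) (cur : Nat) :
    pvMaxOf (pvGaps ((-(cur : Int) - 1) :: pvIdxFrom s 0 ++ [(s.length : Int)])) =
      ((pvGoRuns s cur).foldl Nat.max 0 : Nat) := by
  induction s generalizing cur with
  | nil =>
    by_cases hcur : cur > 0 <;>
      simp [pvIdxFrom, pvGaps, pvMaxOf, pvGoRuns, hcur] <;> omega
  | cons c r ih =>
    have hshift : pvIdxFrom r 1 = (pvIdxFrom r 0).map (· + 1) := by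
      have := pv_idxFrom_shift r 0; simpa using this
    by_cases hc : c ∈ pvConsonants
    · -- consonant: the whole boundary list is a translate of the (cur+1) list for r
      have hlist : (-(cur : Int) - 1) :: pvIdxFrom (c :: r) 0 ++ [((c :: r).length : Int)]
          = ((-(cur : Int) - 2) :: pvIdxFrom r 0 ++ [(r.length : Int)]).map (· + 1) := by
        simp only [pvIdxFrom, if_pos hc, List.map_append, List.map, List.length_cons]
        rw [show (-(cur : Int) - 2 + 1) = -(cur : Int) - 1 from by ring,
            show ((0 : Int) + 1) = (1 : Int) from by norm_num, hshift]
        push_cast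
        rfl
      rw [hlist, pv_gaps_shift]
      have h2 : (-(cur : Int) - 2) = (-((cur + 1 : Nat) : Int) - 1) := by push_cast; ring
      rw [h2, ih (cur + 1)]
      simp [pvGoRuns, hc]
    · -- non-consonant: boundary 0 appears; first gap is cur, the rest is the cur = 0 case for r
      obtain ⟨b, t, hbt⟩ : ∃ b t, pvIdxFrom r 0 ++ [(r.length : Int)] = b :: t := by
        cases pvIdxFrom r 0 <;> exact ⟨_, _, rfl⟩
      have htail : (0 : Int) :: pvIdxFrom r 1 ++ [((c :: r).length : Int)]
          = ((-1 : Int) :: pvIdxFrom r 0 ++ [(r.length : Int)]).map (· + 1) := by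
        simp only [List.map_append, List.map, List.length_cons]
        rw [show ((-1 : Int) + 1) = (0 : Int) from by norm_num, hshift]
        push_cast
        rfl
      have hlist : (-(cur : Int) - 1) :: pvIdxFrom (c :: r) 0 ++ [((c :: r).length : Int)]
          = (-(cur : Int) - 1) :: (0 : Int) :: pvIdxFrom r 1 ++ [((c :: r).length : Int)] := by
        simp [pvIdxFrom, if_neg hc]
      rw [hlist]
      have hgap : pvGaps ((-(cur : Int) - 1) :: (0 : Int) :: pvIdxFrom r 1 ++ [((c :: r).length : Int)])
          = (cur : Int) :: pvGaps ((-1 : Int) :: pvIdxFrom r 0 ++ [(r.length : Int)]) := by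
        have : ((0 : Int) - (-(cur : Int) - 1) - 1) = (cur : Int) := by ring
        simp only [List.cons_append, pvGaps, this]
        congr 1
        have := htail
        simp only [List.cons_append] at this
        rw [this, pv_gaps_shift]
      rw [hgap]
      have hG := ih 0
      simp only [Nat.cast_zero, neg_zero, zero_sub] at hG
      -- pvGaps of the (-1)-list is nonempty
      have hne : ∃ g gs, pvGaps ((-1 : Int) :: pvIdxFrom r 0 ++ [(r.length : Int)]) = g :: gs := by
        rw [show ((-1 : Int) :: pvIdxFrom r 0 ++ [(r.length : Int)])
              = (-1 : Int) :: (pvIdxFrom r 0 ++ [(r.length : Int)]) from by simp, hbt]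
        exact ⟨_, _, rfl⟩
      obtain ⟨g, gs, hgs⟩ := hne
      rw [hgs, pv_maxOf_cons]
      rw [hgs] at hG
      rw [hG]
      have hrhs : (pvGoRuns (c :: r) cur).foldl Nat.max 0
          = Nat.max cur ((pvGoRuns r 0).foldl Nat.max 0) := by
        simp only [pvGoRuns, if_neg hc]
        by_cases hcur : cur > 0
        · rw [if_pos hcur]
          simp only [List.foldl]
          rw [pv_foldl_max]
          simp
        · rw [if_neg hcur]
          have : cur = 0 := by omega
          simp [this]
      rw [hrhs]
      push_cast
      rfl

-- ===== VERDICT (by name: the statement is the Claim_ definition above) =====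
theorem consonants_subsequence_length_py_spec : Claim_equal_consonants_subsequence_length_py := by
  intro s _
  unfold Spec_consonants_subsequence_length_py consonants_subsequence_length_py
    consonants_subsequence_length_py_alt
  rw [pv_loop_spec]
  have hB := pv_bridge s.toList 0
  simp only [Nat.cast_zero, neg_zero, zero_sub] at hB
  rw [hB]
  simp [pvM]
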